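-- pv_equiv track=rewrite | github.com/lucianoscarpaci/Technical-Interview-Prep | Unit4/PartA/p3.py | identify_popular_creators
-- ===== SOURCE A (Python) =====
-- def identify_popular_creators(nft_collection):
--     creator_count = {}
--     for nft in nft_collection:
--         creator = nft["creator"]
--         if creator in creator_count:
--             creator_count[creator] += 1
--         else:
--             creator_count[creator] = 1
--     popular_creators = [creator for creator, count in creator_count.items() if count > 1]
--     return popular_creators
-- ===== SOURCE B (Python) =====
-- def identify_popular_creators(nft_collection):
--     seen = set()
--     dups = set()
--     for nft in nft_collection:
--         creator = nft["creator"]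
--         if creator in seen:
--             dups.add(creator)
--         else:
--             seen.add(creator)
--     result = []
--     added = set()
--     for nft in nft_collection:
--         creator = nft["creator"]
--         if creator in dups and creator not in added:
--             added.add(creator)
--             result.append(creator)
--     return result
-- ===== Notes on version B (the rewrite author's own statement) =====
-- stated objective: alternative
-- what changed: Replaces the count dictionary + items filter by two set-based passes: one pass computing the set of duplicated creators with seen/dups sets, and a second pass over the collection emitting each duplicated creator at its first appearance.
import Mathlib
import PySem

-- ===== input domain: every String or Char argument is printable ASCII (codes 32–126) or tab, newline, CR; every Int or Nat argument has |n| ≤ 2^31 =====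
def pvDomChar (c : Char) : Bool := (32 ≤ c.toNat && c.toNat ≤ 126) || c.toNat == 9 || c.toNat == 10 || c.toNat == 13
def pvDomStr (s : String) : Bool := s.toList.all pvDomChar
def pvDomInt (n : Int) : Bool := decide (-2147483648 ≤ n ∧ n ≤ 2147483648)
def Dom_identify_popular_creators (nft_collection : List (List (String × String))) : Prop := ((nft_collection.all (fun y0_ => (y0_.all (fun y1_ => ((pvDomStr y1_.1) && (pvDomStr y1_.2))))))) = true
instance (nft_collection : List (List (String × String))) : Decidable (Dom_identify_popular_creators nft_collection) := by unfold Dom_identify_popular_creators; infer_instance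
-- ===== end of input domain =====

-- B replaces A's count dictionary by two set-based passes (seen/dups, then an order-preserving
-- re-scan of the collection); alternative decomposition, same cost.

-- ===== PORT A =====
def identify_popular_creators (nft_collection : List (List (String × String))) : List String :=
  let creator_count := nft_collection.foldl (fun d nft =>
      let creator := (PySem.Dict.mk nft).getD "creator" ""
      if d.contains creator then d.modify creator 0 (· + 1) else d.insert creator 1)
    (PySem.Dict.empty : PySem.Dict String Int)
  (creator_count.items.filter (fun p => 1 < p.2)).map (fun p => p.1)

-- ===== PORT B =====
def identify_popular_creators_alt (nft_collection : List (List (String × String))) : List String :=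
  let sd := nft_collection.foldl (fun (p : PySem.Set String × PySem.Set String) nft =>
      let creator := (PySem.Dict.mk nft).getD "creator" ""
      if PySem.Set.contains p.1 creator then (p.1, PySem.Set.add p.2 creator)
      else (PySem.Set.add p.1 creator, p.2))
    (PySem.Set.empty, PySem.Set.empty)
  let dups := sd.2
  let ar := nft_collection.foldl (fun (p : PySem.Set String × List String) nft =>
      let creator := (PySem.Dict.mk nft).getD "creator" ""
      if PySem.Set.contains dups creator && !(PySem.Set.contains p.1 creator)
      then (PySem.Set.add p.1 creator, p.2 ++ [creator])
      else p)
    (PySem.Set.empty, [])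
  ar.2

-- ===== PRECONDITION & SPEC =====
-- Python A (and B) raise KeyError on any nft dict without a "creator" key; Pre_ excludes exactly those.
def Pre_identify_popular_creators (nft_collection : List (List (String × String))) : Prop :=
  (nft_collection.all (fun nft => (PySem.Dict.mk nft).contains "creator")) = true
instance (nft_collection : List (List (String × String))) : Decidable (Pre_identify_popular_creators nft_collection) := by unfold Pre_identify_popular_creators; infer_instance
def pvWitness_identify_popular_creators : (List (List (String × String))) :=
  [[("creator", "alice")], [("creator", "bob")], [("creator", "alice")]]
def Spec_identify_popular_creators (nft_collection : List (List (String × String))) (out : List String) : Prop := out = identify_popular_creators_alt nft_collection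
instance (nft_collection : List (List (String × String))) (out : List String) : Decidable (Spec_identify_popular_creators nft_collection out) := by unfold Spec_identify_popular_creators; infer_instance

-- ===== CLAIM (what is proved, stated in full; the proofs are below) =====
def Claim_equal_identify_popular_creators : Prop := ∀ (nft_collection : List (List (String × String))), Dom_identify_popular_creators nft_collection → Pre_identify_popular_creators nft_collection → Spec_identify_popular_creators nft_collection (identify_popular_creators nft_collection)

-- ===== LEMMAS AND PROOFS =====

-- the creator of one nft record, and the three loop bodies as named step functions
def pvCreator (nft : List (String × String)) : String := (PySem.Dict.mk nft).getD "creator" ""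

def pvStepA (d : PySem.Dict String Int) (c : String) : PySem.Dict String Int :=
  if d.contains c then d.modify c 0 (· + 1) else d.insert c 1

def pvStep1 (p : PySem.Set String × PySem.Set String) (c : String) :
    PySem.Set String × PySem.Set String :=
  if PySem.Set.contains p.1 c then (p.1, PySem.Set.add p.2 c)
  else (PySem.Set.add p.1 c, p.2)

def pvStep2 (dups : PySem.Set String) (p : PySem.Set String × List String) (c : String) :
    PySem.Set String × List String :=
  if PySem.Set.contains dups c && !(PySem.Set.contains p.1 c)
  then (PySem.Set.add p.1 c, p.2 ++ [c]) else p

-- A's step is the counting insert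
theorem pvStepA_eq (d : PySem.Dict String Int) (c : String) :
    pvStepA d c = d.insert c (d.getD c 0 + 1) := by
  by_cases h : d.contains c = true
  · rw [pvStepA, if_pos h]
    simp [PySem.Dict.modify, PySem.Dict.insert, PySem.Dict.getD]
  · have hb : d.contains c = false := by simpa using h
    rw [pvStepA, if_neg (by simp [hb]), PySem.Dict.getD_of_not_contains d 0 hb]
    norm_num

theorem pvAfold_eq (cs : List String) :
    ∀ d : PySem.Dict String Int, cs.foldl pvStepA d
      = cs.foldl (fun d x => d.insert x (d.getD x 0 + 1)) d := by
  induction cs with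
  | nil => intro d; rfl
  | cons c cs ih => intro d; rw [List.foldl_cons, List.foldl_cons, pvStepA_eq, ih]

-- A equals the dedup-then-filter normal form over the creator list
theorem pvA_norm (nfts : List (List (String × String))) :
    identify_popular_creators nfts
      = (PySem.Set.ofList (nfts.map pvCreator)).filter
          (fun c => decide (1 < (List.count c (nfts.map pvCreator) : Int))) := by
  have hrfl : identify_popular_creators nfts
      = ((nfts.foldl (fun d nft => pvStepA d (pvCreator nft))
            (PySem.Dict.empty : PySem.Dict String Int)).items.filter
          (fun p => decide (1 < p.2))).map (fun p => p.1) := rfl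
  have hmap : nfts.foldl (fun d nft => pvStepA d (pvCreator nft))
        (PySem.Dict.empty : PySem.Dict String Int)
      = (nfts.map pvCreator).foldl pvStepA PySem.Dict.empty := List.foldl_map.symm
  rw [hrfl, hmap, pvAfold_eq, PySem.Dict.foldl_insert_getD_add_one_eq_counter,
    PySem.Dict.items_counter, List.filter_map, List.map_map]
  simp [Function.comp_def]

-- B pass 1: the dups set holds exactly the creators seen at least twice
theorem pvB1_snd (cs : List String) :
    ∀ (s t : PySem.Set String) (x : String),
      (x ∈ (cs.foldl pvStep1 (s, t)).2
        ↔ x ∈ t ∨ (x ∈ cs ∧ x ∈ s) ∨ 2 ≤ List.count x cs) := by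
  induction cs with
  | nil => intro s t x; simp
  | cons c cs ih =>
    intro s t x
    rw [List.foldl_cons]
    by_cases h : c ∈ s
    · have hf : pvStep1 (s, t) c = (s, PySem.Set.add t c) := by simp [pvStep1, h]
      rw [hf, ih]
      by_cases hx : x = c
      · subst hx; simp [PySem.Set.mem_add, h, List.mem_cons]
      · simp only [PySem.Set.mem_add, List.mem_cons, hx, or_false, false_or,
          List.count_cons_of_ne (fun e => hx e.symm)]
    · have hf : pvStep1 (s, t) c = (PySem.Set.add s c, t) := by simp [pvStep1, h]
      rw [hf, ih]
      by_cases hx : x = c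
      · subst hx
        rw [List.count_cons_self]
        constructor
        · rintro (ht | ⟨hm, _⟩ | hn)
          · exact Or.inl ht
          · have := List.count_pos_iff.mpr hm
            exact Or.inr (Or.inr (by omega))
          · exact Or.inr (Or.inr (by omega))
        · rintro (ht | ⟨_, hs'⟩ | hn)
          · exact Or.inl ht
          · exact absurd hs' h
          · by_cases hm : x ∈ cs
            · exact Or.inr (Or.inl ⟨hm, (PySem.Set.mem_add s x x).mpr (Or.inr rfl)⟩)
            · have h0 : List.count x cs = 0 := by
                rcases Nat.eq_zero_or_pos (List.count x cs) with h0 | hp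
                · exact h0
                · exact absurd (List.count_pos_iff.mp hp) hm
              omega
      · simp only [PySem.Set.mem_add, List.mem_cons, hx, or_false, false_or,
          List.count_cons_of_ne (fun e => hx e.symm)]

-- B pass 2 stays on the diagonal and is a guarded Set.add fold
theorem pvB2_diag (dups : PySem.Set String) (cs : List String) :
    ∀ r : PySem.Set String,
      cs.foldl (pvStep2 dups) (r, r)
        = (cs.foldl (fun r c => if PySem.Set.contains dups c then PySem.Set.add r c else r) r,
           cs.foldl (fun r c => if PySem.Set.contains dups c then PySem.Set.add r c else r) r) := by
  induction cs with
  | nil => intro r; rfl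
  | cons c cs ih =>
    intro r
    rw [List.foldl_cons, List.foldl_cons]
    by_cases hd : c ∈ dups
    · by_cases h : c ∈ r
      · have h1 : pvStep2 dups (r, r) c = (r, r) := by simp [pvStep2, hd, h]
        have h2 : (if PySem.Set.contains dups c then PySem.Set.add r c else r) = r := by
          simp [hd, PySem.Set.add_of_mem h]
        rw [h1, h2, ih]
      · have h1 : pvStep2 dups (r, r) c = (PySem.Set.add r c, PySem.Set.add r c) := by
          simp [pvStep2, hd, h]
        have h2 : (if PySem.Set.contains dups c then PySem.Set.add r c else r)
            = PySem.Set.add r c := by simp [hd]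
        rw [h1, h2, ih]
    · have h1 : pvStep2 dups (r, r) c = (r, r) := by simp [pvStep2, hd]
      have h2 : (if PySem.Set.contains dups c then PySem.Set.add r c else r) = r := by
        simp [hd]
      rw [h1, h2, ih]

-- filtering commutes with discard
theorem pvDiscard_filter (p : String → Bool) (s : List String) (c : String) :
    (PySem.Set.discard s c).filter p = PySem.Set.discard (s.filter p) c := by
  simp [PySem.Set.discard, List.filter_filter, Bool.and_comm]

theorem pvDiscard_of_not_mem (s : List String) (c : String) (h : c ∉ s) :
    PySem.Set.discard s c = s := by
  rw [show PySem.Set.discard s c = s.filter (fun y => !(y == c)) from by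
    simp [PySem.Set.discard]]
  apply List.filter_eq_self.mpr
  intro a ha
  by_cases hac : a = c
  · exact absurd (hac ▸ ha) h
  · simp [hac]

-- filtering commutes with first-occurrence dedup
theorem pvOfList_filter (p : String → Bool) (cs : List String) :
    PySem.Set.ofList (cs.filter p) = (PySem.Set.ofList cs).filter p := by
  induction cs with
  | nil => rfl
  | cons c cs ih =>
    by_cases hp : p c = true
    · rw [List.filter_cons_of_pos hp, PySem.Set.ofList_cons, ih, PySem.Set.ofList_cons,
        List.filter_cons_of_pos hp, pvDiscard_filter]
    · rw [List.filter_cons_of_neg (by simpa using hp), ih, PySem.Set.ofList_cons,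
        List.filter_cons_of_neg (by simpa using hp), pvDiscard_filter,
        pvDiscard_of_not_mem]
      intro hmem
      have := (List.mem_filter.mp hmem).2
      simp [hp] at this

-- B equals the same normal form
theorem pvB_norm (nfts : List (List (String × String))) :
    identify_popular_creators_alt nfts
      = (PySem.Set.ofList (nfts.map pvCreator)).filter
          (fun c => decide (1 < (List.count c (nfts.map pvCreator) : Int))) := by
  have hrfl : identify_popular_creators_alt nfts
      = (nfts.foldl (fun p nft =>
            pvStep2 ((nfts.foldl (fun p nft => pvStep1 p (pvCreator nft))
                (PySem.Set.empty, PySem.Set.empty)).2) p (pvCreator nft))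
          (PySem.Set.empty, [])).2 := rfl
  have hm1 : nfts.foldl (fun p nft => pvStep1 p (pvCreator nft))
        ((PySem.Set.empty : PySem.Set String), (PySem.Set.empty : PySem.Set String))
      = (nfts.map pvCreator).foldl pvStep1 (PySem.Set.empty, PySem.Set.empty) :=
    List.foldl_map.symm
  have hm2 : ∀ D : PySem.Set String,
      nfts.foldl (fun p nft => pvStep2 D p (pvCreator nft))
          ((PySem.Set.empty : PySem.Set String), ([] : List String))
        = (nfts.map pvCreator).foldl (pvStep2 D) (PySem.Set.empty, []) :=
    fun D => List.foldl_map.symm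
  rw [hrfl, hm1, hm2,
    show ((PySem.Set.empty : PySem.Set String), ([] : List String))
        = ((PySem.Set.empty : PySem.Set String), (PySem.Set.empty : PySem.Set String)) from rfl,
    pvB2_diag]
  rw [show ∀ x : PySem.Set String, (Prod.mk x x).2 = x from fun _ => rfl]
  simp only [PySem.Set.empty]
  have hfilt : ((nfts.map pvCreator).filter
        (fun c => PySem.Set.contains (((nfts.map pvCreator).foldl pvStep1 ([], [])).2) c)).foldl
          PySem.Set.add []
      = (nfts.map pvCreator).foldl
          (fun r c => if PySem.Set.contains (((nfts.map pvCreator).foldl pvStep1 ([], [])).2) c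
            then PySem.Set.add r c else r) [] := List.foldl_filter
  refine Eq.trans hfilt.symm ?_
  rw [← PySem.Set.ofList_eq_foldl, pvOfList_filter]
  apply List.filter_congr
  intro x hx
  have hmem : x ∈ ((nfts.map pvCreator).foldl pvStep1 ([], [])).2
      ↔ 2 ≤ List.count x (nfts.map pvCreator) := by
    simpa using pvB1_snd (nfts.map pvCreator) [] [] x
  by_cases h2 : 2 ≤ List.count x (nfts.map pvCreator)
  · have hi : (1 : Int) < (List.count x (nfts.map pvCreator) : Int) := by exact_mod_cast h2
    simp [hi, hmem.mpr h2]
  · have hnm : x ∉ ((nfts.map pvCreator).foldl pvStep1 ([], [])).2 :=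
      fun hm => h2 (hmem.mp hm)
    have hni : ¬ (1 : Int) < (List.count x (nfts.map pvCreator) : Int) := by exact_mod_cast h2
    simp [hni, hnm]

-- ===== VERDICT (by name: the statement is the Claim_ definition above) =====
theorem identify_popular_creators_spec : Claim_equal_identify_popular_creators := by
  intro nfts _ _
  unfold Spec_identify_popular_creators
  rw [pvA_norm, pvB_norm]
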